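-- pv_equiv track=rewrite | github.com/LT-IntroToAI-SY2324/intro-to-python-alacatus | a1.py | duck_duck_goose
-- ===== SOURCE A (Python) =====
-- from typing import List, TypeVar
--
-- def duck_duck_goose(lst: List[str]) -> List[str]:
--     i = 0
--     while len(lst) > 2:
--         i += 2
--         if i >= len(lst):
--              i -= len(lst)
--         lst.pop(i)
--     return lst
-- ===== SOURCE B (Python) =====
-- def duck_duck_goose(lst):
--     # O(n): compute the two survivors' original indices via the Josephus
--     # removal-index recurrence, instead of simulating list pops.
--     # Mutates lst in place like A (lst[:] = survivors) and returns it.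
--     n = len(lst)
--     if n <= 2:
--         return lst
--     qs = []
--     q = 0
--     for m in range(n, 2, -1):
--         q = (q + 2) % m
--         qs.append(q)
--     a, b = 0, 1
--     for q in reversed(qs):
--         if a >= q:
--             a += 1
--         if b >= q:
--             b += 1
--     lst[:] = [lst[a], lst[b]]
--     return lst
-- ===== Notes on version B (the rewrite author's own statement) =====
-- stated objective: faster
-- what changed: A repeatedly pops from the list (each pop shifts the tail) until two players remain; B never touches the list during elimination: it computes the removal-index sequence q = (q+2) % m for m = n..3 in one pass, lifts the survivor indices (0,1) back through those removals in a second pass, and returns the two elements at the resulting original indices.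
import Mathlib
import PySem

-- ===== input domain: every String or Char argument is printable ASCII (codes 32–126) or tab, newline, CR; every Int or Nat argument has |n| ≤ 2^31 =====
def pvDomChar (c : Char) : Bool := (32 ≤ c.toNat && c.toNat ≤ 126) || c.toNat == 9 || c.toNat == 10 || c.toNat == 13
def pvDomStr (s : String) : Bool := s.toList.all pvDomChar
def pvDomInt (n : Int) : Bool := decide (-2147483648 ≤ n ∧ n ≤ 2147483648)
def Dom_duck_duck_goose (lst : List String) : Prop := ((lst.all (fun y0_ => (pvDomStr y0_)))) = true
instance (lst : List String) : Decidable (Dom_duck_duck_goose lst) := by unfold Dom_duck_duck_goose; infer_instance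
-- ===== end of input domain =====

-- B replaces A's O(n^2) pop-simulation by an O(n) computation of the two survivors'
-- original indices via the Josephus removal-index recurrence; equivalence is about the
-- return value (A pops from its argument in place; B assigns lst[:] = survivors).

-- ===== PORT A =====
-- A's while loop: i += 2; wrap once past the end; lst.pop(i).
def duckLoopA (lst : List String) (i : Int) : List String :=
  if 2 < lst.length then
    let i1 := i + 2
    let i2 := if i1 ≥ (lst.length : Int) then i1 - (lst.length : Int) else i1
    match hp : PySem.List.pop? lst i2 with
    | some r => duckLoopA r.2 i2
    | none => lst  -- lst.pop(i) would raise IndexError here; unreachable from the initial i = 0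
  else lst
termination_by lst.length
decreasing_by
  have := PySem.List.length_of_pop?_eq_some lst hp
  omega

def duck_duck_goose (lst : List String) : List String := duckLoopA lst 0

-- ===== PORT B =====
def duck_duck_goose_alt (lst : List String) : List String :=
  let n := lst.length
  if n ≤ 2 then lst
  else
    -- qs: the removal index q = (q + 2) % m for m = n, n-1, ..., 3
    let qs := ((PySem.List.pyRange (n : Int) 2 (-1)).foldl
        (fun (st : List Int × Int) m =>
          let q := PySem.Int.mod (st.2 + 2) m
          (st.1 ++ [q], q)) ([], 0)).1
    -- lift the survivor indices (0, 1) back through the removals, last removal first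
    let ab := qs.reverse.foldl
        (fun (ab : Int × Int) q =>
          (if ab.1 ≥ q then ab.1 + 1 else ab.1,
           if ab.2 ≥ q then ab.2 + 1 else ab.2)) (0, 1)
    [PySem.List.pyGetD lst ab.1 "", PySem.List.pyGetD lst ab.2 ""]

-- ===== PRECONDITION & SPEC =====
def Spec_duck_duck_goose (lst : List String) (out : List String) : Prop := out = duck_duck_goose_alt lst
instance (lst : List String) (out : List String) : Decidable (Spec_duck_duck_goose lst out) := by unfold Spec_duck_duck_goose; infer_instance

-- ===== CLAIM (what is proved, stated in full; the proofs are below) =====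
def Claim_equal_duck_duck_goose : Prop := ∀ (lst : List String), Dom_duck_duck_goose lst → Spec_duck_duck_goose lst (duck_duck_goose lst)

-- ===== LEMMAS AND PROOFS =====

-- shared model: survivor indices of the Josephus elimination, Nat level
def jlift (q x : Nat) : Nat := if q ≤ x then x + 1 else x

def jos : Nat → Nat → Nat × Nat
  | 0, _ => (0, 1)
  | 1, _ => (0, 1)
  | 2, _ => (0, 1)
  | (m+3), p =>
    let q := (p + 2) % (m + 3)
    let ab := jos (m + 2) q
    (jlift q ab.1, jlift q ab.2)

def qlist : Nat → Nat → List Nat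
  | 0, _ => []
  | 1, _ => []
  | 2, _ => []
  | (m+3), p =>
    let q := (p + 2) % (m + 3)
    q :: qlist (m + 2) q

def qptr : Nat → Nat → Nat
  | 0, p => p
  | 1, p => p
  | 2, p => p
  | (m+3), p => qptr (m + 2) ((p + 2) % (m + 3))

lemma jos_bounds : ∀ m p, 2 ≤ m → (jos m p).1 < (jos m p).2 ∧ (jos m p).2 < m := by
  intro m
  induction m with
  | zero => intro p h; omega
  | succ k ih =>
    intro p h
    match k, h with
    | 1, _ => simp [jos]
    | (n+2), _ =>
      have hq : (p + 2) % (n + 3) < n + 3 := Nat.mod_lt _ (by omega)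
      have hih := ih ((p + 2) % (n + 3)) (by omega)
      simp only [jos, jlift]
      constructor
      · split_ifs <;> omega
      · split_ifs <;> omega

lemma mod_small (a b : Nat) (hb : 0 < b) (h : a < 2 * b) :
    a % b = if b ≤ a then a - b else a := by
  split_ifs with h1
  · rw [Nat.mod_eq_sub_mod h1, Nat.mod_eq_of_lt (by omega)]
  · exact Nat.mod_eq_of_lt (by omega)

lemma getD_eraseIdx (l : List String) (q x : Nat) (hq : q < l.length) (hx : x < l.length - 1) :
    (l.eraseIdx q).getD x "" = l.getD (jlift q x) "" := by
  have hlen : (l.eraseIdx q).length = l.length - 1 := by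
    simp [List.length_eraseIdx, hq]
  rw [List.getD_eq_getElem _ _ (by omega)]
  rw [List.getElem_eraseIdx]
  unfold jlift
  split_ifs with h1 h2 h2 <;> rw [List.getD_eq_getElem _ _ (by omega)] <;> omega

lemma loopA_eq : ∀ m (lst : List String) (p : Nat), lst.length = m → p ≤ m →
    duckLoopA lst (p : Int) =
      if m ≤ 2 then lst else [lst.getD (jos m p).1 "", lst.getD (jos m p).2 ""] := by
  intro m
  induction m with
  | zero =>
    intro lst p hl hp
    rw [if_pos (by omega), duckLoopA.eq_def, if_neg (by omega)]
  | succ k ih =>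
    intro lst p hl hp
    by_cases hk : k + 1 ≤ 2
    · rw [if_pos hk, duckLoopA.eq_def, if_neg (by omega)]
    · rw [if_neg hk]
      have h3 : 2 < lst.length := by omega
      have hq : (p + 2) % (k + 1) < k + 1 := Nat.mod_lt _ (by omega)
      have hi2 : (if (p : Int) + 2 ≥ (lst.length : Int) then (p : Int) + 2 - (lst.length : Int)
            else (p : Int) + 2) = (((p + 2) % (k + 1) : Nat) : Int) := by
        rw [hl, mod_small (p + 2) (k + 1) (by omega) (by omega)]
        split_ifs <;> omega
      rw [duckLoopA.eq_def, if_pos h3]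
      simp only [hi2]
      split
      case _ r heq =>
        rw [hi2, PySem.List.pop?_natCast lst _ (by omega)] at heq
        simp only [Option.some.injEq] at heq
        subst heq
        show duckLoopA (lst.eraseIdx ((p + 2) % (k + 1))) (((p + 2) % (k + 1) : Nat) : Int) = _
        have hlen' : (lst.eraseIdx ((p + 2) % (k + 1))).length = k := by
          simp [List.length_eraseIdx, hq, hl]
        rw [ih _ _ hlen' (by omega)]
        by_cases hk2 : k ≤ 2
        · -- k = 2 : lst has exactly 3 elements
          rw [if_pos hk2]
          have hk2' : k = 2 := by omega
          subst hk2'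
          have hq3 : (p + 2) % 3 < 3 := hq
          rcases lst with _ | ⟨a, _ | ⟨b, _ | ⟨c, _ | _⟩⟩⟩ <;> simp_all
          interval_cases h : (p + 2) % 3 <;> simp [jos, jlift, h]
        · rw [if_neg hk2]
          obtain ⟨n, rfl⟩ : ∃ n, k = n + 3 := ⟨k - 3, by omega⟩
          have hb := jos_bounds (n + 3) ((p + 2) % (n + 3 + 1)) (by omega)
          show [(lst.eraseIdx ((p + 2) % (n + 3 + 1))).getD (jos (n + 3) ((p + 2) % (n + 3 + 1))).1 "",
                (lst.eraseIdx ((p + 2) % (n + 3 + 1))).getD (jos (n + 3) ((p + 2) % (n + 3 + 1))).2 ""]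
              = [lst.getD (jlift ((p + 2) % (n + 3 + 1)) (jos (n + 3) ((p + 2) % (n + 3 + 1))).1) "",
                 lst.getD (jlift ((p + 2) % (n + 3 + 1)) (jos (n + 3) ((p + 2) % (n + 3 + 1))).2) ""]
          rw [getD_eraseIdx lst _ _ (by omega) (by omega),
              getD_eraseIdx lst _ _ (by omega) (by omega)]
      case _ heq =>
        rw [hi2, PySem.List.pop?_natCast lst _ (by omega)] at heq
        exact absurd heq (by simp)

lemma fold_build : ∀ (m : Nat) (p : Nat) (acc : List Int),
    ((PySem.List.pyRange (m : Int) 2 (-1)).foldl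
        (fun (st : List Int × Int) mm =>
          let q := PySem.Int.mod (st.2 + 2) mm
          (st.1 ++ [q], q)) (acc, (p : Int)))
      = (acc ++ (qlist m p).map (Nat.cast : Nat → Int), (qptr m p : Int)) := by
  intro m
  induction m with
  | zero =>
    intro p acc
    rw [PySem.List.pyRange_neg_one_eq_nil (by norm_num)]
    simp [qlist, qptr]
  | succ k ih =>
    intro p acc
    match k with
    | 0 =>
      rw [PySem.List.pyRange_neg_one_eq_nil (by norm_num)]
      simp [qlist, qptr]
    | 1 =>
      rw [PySem.List.pyRange_neg_one_eq_nil (by norm_num)]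
      simp [qlist, qptr]
    | (n+2) =>
      rw [PySem.List.pyRange_neg_one_cons (by push_cast; omega)]
      simp only [List.foldl_cons]
      have hc : ((p : Int) + 2) = (((p + 2 : Nat)) : Int) := by push_cast; ring
      have hm : (((n + 3 : Nat) : Int) - 1) = (((n + 2 : Nat)) : Int) := by push_cast; ring
      simp only [hc, PySem.Int.mod_natCast, hm]
      rw [ih ((p + 2) % (n + 3)) (acc ++ [(((p + 2) % (n + 3) : Nat) : Int)])]
      simp [qlist, qptr]

lemma fold_lift : ∀ m (p : Nat),
    (((qlist m p).map (Nat.cast : Nat → Int)).reverse.foldl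
        (fun (ab : Int × Int) q =>
          (if ab.1 ≥ q then ab.1 + 1 else ab.1,
           if ab.2 ≥ q then ab.2 + 1 else ab.2)) (0, 1))
      = (((jos m p).1 : Int), ((jos m p).2 : Int)) := by
  intro m
  induction m with
  | zero => intro p; simp [qlist, jos]
  | succ k ih =>
    intro p
    match k with
    | 0 => simp [qlist, jos]
    | 1 => simp [qlist, jos]
    | (n+2) =>
      have hq := ih ((p + 2) % (n + 3))
      simp only [qlist, List.map_cons, List.reverse_cons]
      rw [List.foldl_append, hq]
      simp only [List.foldl_cons, List.foldl_nil, jos, jlift, Prod.mk.injEq]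
      refine ⟨?_, ?_⟩ <;> (simp only [ge_iff_le, Nat.cast_le]; split_ifs <;> push_cast <;> omega)

lemma alt_eq (lst : List String) (h : 2 < lst.length) :
    duck_duck_goose_alt lst =
      [lst.getD (jos lst.length 0).1 "", lst.getD (jos lst.length 0).2 ""] := by
  unfold duck_duck_goose_alt
  rw [if_neg (by omega)]
  have hb := fold_build lst.length 0 []
  rw [show ((0 : Nat) : Int) = (0 : Int) from rfl] at hb
  rw [hb]
  simp only [List.nil_append]
  rw [fold_lift lst.length 0]
  simp [PySem.List.pyGetD_natCast]

-- ===== VERDICT (by name: the statement is the Claim_ definition above) =====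
theorem duck_duck_goose_spec : Claim_equal_duck_duck_goose := by
  intro lst _
  unfold Spec_duck_duck_goose duck_duck_goose
  by_cases h : 2 < lst.length
  · have hA := loopA_eq lst.length lst 0 rfl (by omega)
    rw [if_neg (by omega)] at hA
    rw [show ((0:Nat):Int) = (0:Int) from rfl] at hA
    rw [hA, alt_eq lst h]
  · have hA := loopA_eq lst.length lst 0 rfl (by omega)
    rw [if_pos (by omega)] at hA
    rw [show ((0:Nat):Int) = (0:Int) from rfl] at hA
    rw [hA]
    unfold duck_duck_goose_alt
    simp only [if_pos (by omega : lst.length ≤ 2)]
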